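-- pv_equiv track=rewrite | github.com/taoskytie/classSchedule | classSchedule.py | numToDay
-- ===== SOURCE A (Python) =====
-- def numToDay(numList):
-- 	dayList={}
-- 	for i in numList:
-- 		i=i-1
-- 		if i//8 in dayList.keys():
-- 			dayList[i//8].append(i%8)
-- 		else:
-- 			dayList.update({i//8:[i%8]})
-- 	return dayList
-- ===== SOURCE B (Python) =====
-- def numToDay(numList):
--     keys = list(dict.fromkeys((i - 1) // 8 for i in numList))
--     return {k: [(i - 1) % 8 for i in numList if (i - 1) // 8 == k] for k in keys}
-- ===== Notes on version B (the rewrite author's own statement) =====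
-- stated objective: alternative
-- what changed: A builds the dict in one pass, branching on key presence and appending in place; B first dedups the bucket keys in first-occurrence order, then builds the whole dict with one comprehension that filters the input per key.
import Mathlib
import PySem

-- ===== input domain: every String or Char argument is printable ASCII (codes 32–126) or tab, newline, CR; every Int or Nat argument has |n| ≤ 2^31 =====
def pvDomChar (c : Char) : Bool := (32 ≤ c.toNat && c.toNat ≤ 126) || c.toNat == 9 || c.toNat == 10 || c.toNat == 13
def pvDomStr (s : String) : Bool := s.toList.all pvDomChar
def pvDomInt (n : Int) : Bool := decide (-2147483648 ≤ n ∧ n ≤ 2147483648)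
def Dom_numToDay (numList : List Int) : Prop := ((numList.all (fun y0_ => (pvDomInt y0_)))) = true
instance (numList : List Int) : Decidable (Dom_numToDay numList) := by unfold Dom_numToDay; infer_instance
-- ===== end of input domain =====

-- B replaces A's single-pass dict build (branch on key presence, append in place) with a
-- dedup of the bucket keys followed by one per-key filtering comprehension; alternative, not faster.

-- ===== PORT A =====
-- one loop: i = i-1; if i//8 in dayList: append i%8 else insert {i//8: [i%8]}; returns the dict's items
def numToDay (numList : List Int) : List (Int × List Int) :=
  (numList.foldl
    (fun dayList i =>
      let i := i - 1
      if dayList.contains (PySem.Int.floordiv i 8) then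
        dayList.modify (PySem.Int.floordiv i 8) [] (fun v => v ++ [PySem.Int.mod i 8])
      else
        dayList.insert (PySem.Int.floordiv i 8) [PySem.Int.mod i 8])
    (PySem.Dict.empty : PySem.Dict Int (List Int))).items

-- ===== PORT B =====
-- keys = list(dict.fromkeys((i-1)//8 for i in numList)); then a dict comprehension over keys
def numToDay_alt (numList : List Int) : List (Int × List Int) :=
  let keys := PySem.List.dedup (numList.map (fun i => PySem.Int.floordiv (i - 1) 8))
  keys.map (fun k =>
    (k, (numList.filter (fun i => PySem.Int.floordiv (i - 1) 8 == k)).map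
          (fun i => PySem.Int.mod (i - 1) 8)))

-- ===== PRECONDITION & SPEC =====
def Spec_numToDay (numList : List Int) (out : List (Int × List Int)) : Prop := out = numToDay_alt numList
instance (numList : List Int) (out : List (Int × List Int)) : Decidable (Spec_numToDay numList out) := by unfold Spec_numToDay; infer_instance

-- ===== CLAIM (what is proved, stated in full; the proofs are below) =====
def Claim_equal_numToDay : Prop := ∀ (numList : List Int), Dom_numToDay numList → Spec_numToDay numList (numToDay numList)

-- ===== LEMMAS AND PROOFS =====

-- A's branching step is exactly Dict.modify with default []
theorem numToDay_step_eq (d : PySem.Dict Int (List Int)) (i : Int) :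
    (if d.contains (PySem.Int.floordiv (i - 1) 8) = true then
       d.modify (PySem.Int.floordiv (i - 1) 8) [] (fun v => v ++ [PySem.Int.mod (i - 1) 8])
     else
       d.insert (PySem.Int.floordiv (i - 1) 8) [PySem.Int.mod (i - 1) 8])
    = d.modify (PySem.Int.floordiv (i - 1) 8) [] (fun v => v ++ [PySem.Int.mod (i - 1) 8]) := by
  by_cases h : d.contains (PySem.Int.floordiv (i - 1) 8) = true
  · rw [if_pos h]
  · have h' : d.contains (PySem.Int.floordiv (i - 1) 8) = false := by simpa using h
    rw [if_neg h]
    simp only [PySem.Dict.modify]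
    rw [PySem.Dict.getD_of_not_contains d [] h']
    simp

theorem numToDay_eq_modify_fold (numList : List Int) :
    numToDay numList =
      ((numList.map (fun i => (PySem.Int.floordiv (i - 1) 8, PySem.Int.mod (i - 1) 8))).foldl
        (fun d p => d.modify p.1 [] (fun v => v ++ [p.2]))
        (PySem.Dict.empty : PySem.Dict Int (List Int))).items := by
  unfold numToDay
  rw [List.foldl_map]
  congr 1
  exact PySem.List.foldl_congr_mem numList _ _ _ (fun acc x _ => numToDay_step_eq acc x)

theorem numToDay_spec' (numList : List Int) : numToDay numList = numToDay_alt numList := by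
  rw [numToDay_eq_modify_fold]
  set pairs := numList.map (fun i => (PySem.Int.floordiv (i - 1) 8, PySem.Int.mod (i - 1) 8)) with hpairs
  set d := pairs.foldl (fun d p => d.modify p.1 [] (fun v => v ++ [p.2]))
            (PySem.Dict.empty : PySem.Dict Int (List Int)) with hd
  have hkeys : d.keys = PySem.List.dedup (numList.map (fun i => PySem.Int.floordiv (i - 1) 8)) := by
    rw [hd, hpairs, List.foldl_map]
    rw [PySem.Dict.keys_foldl_modify_key (key := fun i => PySem.Int.floordiv (i - 1) 8)]
    simp [PySem.Set.update_nil_left, PySem.Dict.keys, PySem.Dict.empty]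
  have hnodup : d.keys.Nodup := by
    rw [hkeys]; exact PySem.List.nodup_dedup _
  have hget : ∀ k : Int, d.getD k [] =
      (numList.filter (fun i => PySem.Int.floordiv (i - 1) 8 == k)).map
        (fun i => PySem.Int.mod (i - 1) 8) := by
    intro k
    rw [hd, PySem.Dict.getD_foldl_modify_append, PySem.Dict.getD_empty, hpairs]
    rw [List.filter_map, List.map_map]
    simp [Function.comp_def]
  rw [PySem.Dict.items_eq_map_keys d hnodup []]
  unfold numToDay_alt
  rw [hkeys]
  apply List.map_congr_left
  intro k _
  simp [hget k]

-- ===== VERDICT (by name: the statement is the Claim_ definition above) =====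
theorem numToDay_spec : Claim_equal_numToDay := by
  intro numList _
  exact numToDay_spec' numList
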